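-- pv_equiv track=rewrite | github.com/AndroidRadish/zeus_open | .zeus/v3/scripts/store/sqlalchemy_base.py | _resolve_aggregate_status
-- ===== SOURCE A (Python) =====
-- def _resolve_aggregate_status(statuses: list[str]) -> str:
--     if any(s == "failed" for s in statuses):
--         return "failed"
--     if any(s == "running" for s in statuses):
--         return "running"
--     if all(s == "completed" for s in statuses):
--         return "completed"
--     return "pending"
-- ===== SOURCE B (Python) =====
-- def _resolve_aggregate_status(statuses: list[str]) -> str:
--     saw_failed = False
--     saw_running = False
--     all_completed = True
--     for s in statuses:
--         if s == "failed":
--             saw_failed = True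
--         if s == "running":
--             saw_running = True
--         if s != "completed":
--             all_completed = False
--     if saw_failed:
--         return "failed"
--     if saw_running:
--         return "running"
--     if all_completed:
--         return "completed"
--     return "pending"
-- ===== Notes on version B (the rewrite author's own statement) =====
-- stated objective: alternative
-- what changed: Replaced the three sequential any/any/all scans and early-return chain with a single loop accumulating saw_failed/saw_running/all_completed flags, deciding the result once after the loop.
import Mathlib
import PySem

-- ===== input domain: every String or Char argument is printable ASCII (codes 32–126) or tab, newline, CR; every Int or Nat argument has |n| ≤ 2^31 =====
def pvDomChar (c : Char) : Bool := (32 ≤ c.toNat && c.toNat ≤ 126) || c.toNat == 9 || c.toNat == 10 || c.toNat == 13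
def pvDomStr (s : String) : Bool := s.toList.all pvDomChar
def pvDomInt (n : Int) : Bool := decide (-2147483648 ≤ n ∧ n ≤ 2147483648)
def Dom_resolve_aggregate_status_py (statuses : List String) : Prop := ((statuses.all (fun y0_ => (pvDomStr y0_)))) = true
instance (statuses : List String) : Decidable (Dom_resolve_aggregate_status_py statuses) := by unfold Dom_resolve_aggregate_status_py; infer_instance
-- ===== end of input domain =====

-- B replaces A's three sequential any/any/all scans with one pass accumulating three flags (alternative decomposition, same cost).


-- ===== PORT A =====
def resolve_aggregate_status_py (statuses : List String) : String :=
  if statuses.any (fun s => s == "failed") then "failed"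
  else if statuses.any (fun s => s == "running") then "running"
  else if statuses.all (fun s => s == "completed") then "completed"
  else "pending"

-- ===== PORT B =====
-- one iteration of B's loop body: update the three flags for one status
def pvStep (acc : Bool × Bool × Bool) (s : String) : Bool × Bool × Bool :=
  let acc := if s == "failed" then (true, acc.2.1, acc.2.2) else acc
  let acc := if s == "running" then (acc.1, true, acc.2.2) else acc
  if s != "completed" then (acc.1, acc.2.1, false) else acc

def resolve_aggregate_status_py_alt (statuses : List String) : String :=
  let st := statuses.foldl pvStep (false, false, true)
  if st.1 then "failed"
  else if st.2.1 then "running"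
  else if st.2.2 then "completed"
  else "pending"

-- ===== PRECONDITION & SPEC =====
def Spec_resolve_aggregate_status_py (statuses : List String) (out : String) : Prop := out = resolve_aggregate_status_py_alt statuses
instance (statuses : List String) (out : String) : Decidable (Spec_resolve_aggregate_status_py statuses out) := by unfold Spec_resolve_aggregate_status_py; infer_instance

-- ===== CLAIM (what is proved, stated in full; the proofs are below) =====
def Claim_equal_resolve_aggregate_status_py : Prop := ∀ (statuses : List String), Dom_resolve_aggregate_status_py statuses → Spec_resolve_aggregate_status_py statuses (resolve_aggregate_status_py statuses)

-- ===== LEMMAS AND PROOFS =====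
theorem pvStep_eq (f r c : Bool) (s : String) :
    pvStep (f, r, c) s = (f || (s == "failed"), r || (s == "running"), c && (s == "completed")) := by
  by_cases h1 : s = "failed" <;> by_cases h2 : s = "running" <;> by_cases h3 : s = "completed" <;>
    simp [pvStep, h1, h2, h3]

theorem pv_fold_char (statuses : List String) (f r c : Bool) :
    statuses.foldl pvStep (f, r, c)
    = (f || statuses.any (fun s => s == "failed"),
       r || statuses.any (fun s => s == "running"),
       c && statuses.all (fun s => s == "completed")) := by
  induction statuses generalizing f r c with
  | nil => simp
  | cons hd tl ih =>
    rw [List.foldl_cons, pvStep_eq, ih]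
    simp [List.any_cons, List.all_cons, Bool.or_assoc, Bool.and_assoc]

-- ===== VERDICT (by name: the statement is the Claim_ definition above) =====
theorem resolve_aggregate_status_py_spec : Claim_equal_resolve_aggregate_status_py := by
  intro statuses _
  unfold Spec_resolve_aggregate_status_py resolve_aggregate_status_py resolve_aggregate_status_py_alt
  simp only [pv_fold_char, Bool.false_or, Bool.true_and]
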